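-- pv_equiv track=rewrite | github.com/abett07/jht | backend/app/matcher.py | _skill_overlap
-- ===== SOURCE A (Python) =====
-- def _skill_overlap(job_text: str, resume_json: dict):
--     skills = resume_json.get("skills", []) if resume_json else []
--     job_low = job_text.lower()
--     count = 0
--     for s in skills:
--         if not s:
--             continue
--         if s.lower() in job_low:
--             count += 1
--     return count
-- ===== SOURCE B (Python) =====
-- def _skill_overlap(job_text: str, resume_json: dict):
--     skills = resume_json.get("skills", []) if resume_json else []
--     job_low = job_text.lower()
--     n = len(job_low)
--     lengths = {len(s) for s in skills if s}
--     subs = {job_low[i:i + m] for m in lengths for i in range(n - m + 1)}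
--     return sum(1 for s in skills if s and s.lower() in subs)
-- ===== Notes on version B (the rewrite author's own statement) =====
-- stated objective: alternative
-- what changed: B replaces A's per-skill substring scan of the job text by a hash-set index: it precomputes the set of all substrings of the lowered job text whose lengths occur among the non-empty skills, then counts skills by a single set-membership lookup each.
import Mathlib
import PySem

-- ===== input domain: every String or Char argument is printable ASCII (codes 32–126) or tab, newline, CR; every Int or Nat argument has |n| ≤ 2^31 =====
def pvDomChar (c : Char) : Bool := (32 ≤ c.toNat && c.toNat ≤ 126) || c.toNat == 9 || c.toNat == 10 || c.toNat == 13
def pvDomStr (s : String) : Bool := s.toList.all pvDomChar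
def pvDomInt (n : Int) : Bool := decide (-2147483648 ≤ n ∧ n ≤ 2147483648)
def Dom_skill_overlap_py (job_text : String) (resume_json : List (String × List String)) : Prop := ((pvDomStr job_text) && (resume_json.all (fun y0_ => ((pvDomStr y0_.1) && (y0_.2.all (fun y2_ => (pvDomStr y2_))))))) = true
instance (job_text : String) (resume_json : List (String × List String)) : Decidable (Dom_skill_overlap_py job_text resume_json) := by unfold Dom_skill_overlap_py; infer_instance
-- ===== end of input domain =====

-- B replaces A's per-skill substring scan by a precomputed set of the job text's
-- substrings at the skills' lengths, looked up once per skill (objective: alternative).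

-- ===== PORT A =====
def skill_overlap_py (job_text : String) (resume_json : List (String × List String)) : Int :=
  let skills := if resume_json.isEmpty then [] else (PySem.Dict.mk resume_json).getD "skills" []
  let job_low := PySem.Str.lower job_text
  let count : Int := 0
  skills.foldl (fun count s =>
    if s == "" then count
    else if PySem.Str.isIn (PySem.Str.lower s) job_low then count + 1 else count) count

-- ===== PORT B =====
def skill_overlap_py_alt (job_text : String) (resume_json : List (String × List String)) : Int :=
  let skills := if resume_json.isEmpty then [] else (PySem.Dict.mk resume_json).getD "skills" []
  let job_low := PySem.Str.lower job_text
  let n : Int := PySem.Str.len job_low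
  let lengths : PySem.Set Int :=
    PySem.Set.ofList ((skills.filter (fun s => !(s == ""))).map (fun s => PySem.Str.len s))
  let subs : PySem.Set String :=
    PySem.Set.ofList (lengths.flatMap (fun m =>
      (PySem.List.pyRange 0 (n - m + 1)).map (fun i =>
        PySem.Str.slice job_low (some i) (some (i + m)))))
  ((skills.filter (fun s => !(s == "") && PySem.Set.contains subs (PySem.Str.lower s))).map
    (fun _ => (1 : Int))).sum

-- ===== PRECONDITION & SPEC =====
def Spec_skill_overlap_py (job_text : String) (resume_json : List (String × List String)) (out : Int) : Prop := out = skill_overlap_py_alt job_text resume_json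
instance (job_text : String) (resume_json : List (String × List String)) (out : Int) : Decidable (Spec_skill_overlap_py job_text resume_json out) := by unfold Spec_skill_overlap_py; infer_instance

-- ===== CLAIM (what is proved, stated in full; the proofs are below) =====
def Claim_equal_skill_overlap_py : Prop := ∀ (job_text : String) (resume_json : List (String × List String)), Dom_skill_overlap_py job_text resume_json → Spec_skill_overlap_py job_text resume_json (skill_overlap_py job_text resume_json)

-- ===== LEMMAS AND PROOFS =====

-- A's counting loop is a countP.
lemma foldlA_eq_countP (job_low : String) (l : List String) (a : Int) :
    l.foldl (fun count s =>
      if s == "" then count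
      else if PySem.Str.isIn (PySem.Str.lower s) job_low then count + 1 else count) a
    = a + (l.countP (fun s => !(s == "") && PySem.Str.isIn (PySem.Str.lower s) job_low) : Int) := by
  induction l generalizing a with
  | nil => simp
  | cons x xs ih =>
    rw [List.foldl_cons, ih, List.countP_cons]
    cases hx : (x == "") <;> cases hin : PySem.Str.isIn (PySem.Str.lower x) job_low <;>
      simp
    all_goals omega

-- B's 1-sum over the filter is a countP.
lemma sum_filter_eq_countP {α : Type} (l : List α) (p : α → Bool) :
    ((l.filter p).map (fun _ => (1 : Int))).sum = (l.countP p : Int) := by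
  rw [PySem.List.sum_map_const_int, List.countP_eq_length_filter]
  ring

-- a take-of-drop block is an infix
lemma take_drop_isInfix {α : Type} (l : List α) (a b : Nat) :
    (l.drop a).take b <:+: l :=
  ((List.take_prefix _ _).isInfix).trans ((List.drop_suffix _ _).isInfix)

-- the key pointwise fact: for a skill drawn from the list, membership of its
-- lowercase form in B's substring set is exactly A's substring test
lemma isIn_eq_contains (job_text : String) (skills : List String) (s : String)
    (hs : s ∈ skills) (hne : (s == "") = false) :
    PySem.Str.isIn (PySem.Str.lower s) (PySem.Str.lower job_text) =
    PySem.Set.contains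
      (PySem.Set.ofList
        ((PySem.Set.ofList ((skills.filter (fun s => !(s == ""))).map (fun s => PySem.Str.len s))).flatMap
          (fun m => (PySem.List.pyRange 0 (PySem.Str.len (PySem.Str.lower job_text) - m + 1)).map
            (fun i => PySem.Str.slice (PySem.Str.lower job_text) (some i) (some (i + m))))))
      (PySem.Str.lower s) := by
  set job_low := PySem.Str.lower job_text with hjl
  set pat := PySem.Str.lower s with hpat
  have hlenpat : pat.toList.length = s.toList.length := by
    rw [hpat, PySem.Str.toList_lower, PySem.Chars.lower, List.length_map]
  rw [Bool.eq_iff_iff, PySem.Str.isIn_iff_infix, PySem.Set.contains_iff, PySem.Set.mem_ofList]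
  constructor
  · rintro ⟨t, u, htu⟩
    have hn : job_low.toList.length = t.length + pat.toList.length + u.length := by
      rw [← htu]; simp only [List.length_append]
    refine List.mem_flatMap.mpr ⟨PySem.Str.len s, ?_, List.mem_map.mpr ⟨(t.length : Int), ?_, ?_⟩⟩
    · exact (PySem.Set.mem_ofList _ _).mpr (List.mem_map.mpr
        ⟨s, List.mem_filter.mpr ⟨hs, by simp [hne]⟩, rfl⟩)
    · rw [PySem.List.mem_pyRange_one]
      simp only [PySem.Str.len_eq]
      constructor <;> omega
    · apply String.toList_inj.mp
      rw [PySem.Str.toList_slice]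
      simp only [PySem.Chars.slice_eq_listSlice, PySem.Str.len_eq]
      rw [PySem.List.slice_toNat _ (by positivity) (by omega)]
      have h1 : ((t.length : Int)).toNat = t.length := by omega
      rw [h1]
      have h2 : (((t.length : Int)) + (s.toList.length : Int)).toNat - t.length
          = pat.toList.length := by omega
      rw [h2]
      have hsplit : job_low.toList = t ++ (pat.toList ++ u) := by
        rw [← htu, List.append_assoc]
      rw [hsplit, List.drop_left]
      exact List.take_left
  · intro hmem
    obtain ⟨m, hm, hx⟩ := List.mem_flatMap.mp hmem
    obtain ⟨i, hi, hslice⟩ := List.mem_map.mp hx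
    obtain ⟨s', hs', hlen'⟩ := List.mem_map.mp ((PySem.Set.mem_ofList _ _).mp hm)
    have hm0 : 0 ≤ m := by
      have h := hlen'
      simp only [PySem.Str.len_eq] at h
      omega
    have hi0 : 0 ≤ i := (PySem.List.mem_pyRange_one.mp hi).1
    have hEq : pat.toList = (job_low.toList.drop i.toNat).take ((i + m).toNat - i.toNat) := by
      rw [← hslice, PySem.Str.toList_slice]
      simp only [PySem.Chars.slice_eq_listSlice]
      rw [PySem.List.slice_toNat _ hi0 (by omega)]
    rw [hEq]
    exact take_drop_isInfix _ _ _

-- ===== VERDICT (by name: the statement is the Claim_ definition above) =====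
theorem skill_overlap_py_spec : Claim_equal_skill_overlap_py := by
  intro job_text resume_json _
  unfold Spec_skill_overlap_py skill_overlap_py skill_overlap_py_alt
  simp only []
  generalize (if resume_json.isEmpty then ([] : List String)
      else (PySem.Dict.mk resume_json).getD "skills" []) = skills
  rw [foldlA_eq_countP, sum_filter_eq_countP, zero_add]
  congr 1
  apply List.countP_congr
  intro s hs
  by_cases hne : (s == "") = true
  · simp [hne]
  · simp only [Bool.not_eq_true] at hne
    simp only [hne, Bool.not_false, Bool.true_and]
    rw [isIn_eq_contains job_text skills s hs hne]
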